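-- pv_equiv track=rewrite | github.com/AzeemGhumman/iqbal-demystified-dataset | poems-parser.py | getPortions
-- ===== SOURCE A (Python) =====
-- TOTAL_PORTIONS = 8
--
-- def getPortions(contents):
--     allPortions = []
--     portion = []
--     for line in contents:
--         line = line.strip()
--         if (line.strip() == "*"):
--             allPortions.append(portion)
--             portion = []
--         elif (len(line) == 0):
--             pass
--         else:
--             portion.append(line)
--
--     if (len(allPortions) is not TOTAL_PORTIONS):
--         print ("Error: total portions not what was expected")
--     return allPortions
-- ===== SOURCE B (Python) =====
-- TOTAL_PORTIONS = 8
--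
-- def getPortions(contents):
--     # clean pass: strip every line, drop the blank ones
--     tokens = [s for s in map(str.strip, contents) if s]
--     # split pass: repeatedly find the next '*' marker and slice the group before it;
--     # the segment after the last marker is never reached, hence discarded
--     allPortions = []
--     pos = 0
--     while True:
--         try:
--             nxt = tokens.index("*", pos)
--         except ValueError:
--             break
--         allPortions.append(tokens[pos:nxt])
--         pos = nxt + 1
--     if len(allPortions) is not TOTAL_PORTIONS:
--         print("Error: total portions not what was expected")
--     return allPortions
-- ===== Notes on version B (the rewrite author's own statement) =====
-- stated objective: alternative
-- what changed: A's per-line state machine (two growing accumulators updated line by line) is replaced by a two-stage decomposition: a clean pass that strips lines and drops blank ones, then a find-and-slice loop that repeatedly locates the next '*' marker with list.index and slices out the group before it, naturally discarding the segment after the last marker.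
import Mathlib
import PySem

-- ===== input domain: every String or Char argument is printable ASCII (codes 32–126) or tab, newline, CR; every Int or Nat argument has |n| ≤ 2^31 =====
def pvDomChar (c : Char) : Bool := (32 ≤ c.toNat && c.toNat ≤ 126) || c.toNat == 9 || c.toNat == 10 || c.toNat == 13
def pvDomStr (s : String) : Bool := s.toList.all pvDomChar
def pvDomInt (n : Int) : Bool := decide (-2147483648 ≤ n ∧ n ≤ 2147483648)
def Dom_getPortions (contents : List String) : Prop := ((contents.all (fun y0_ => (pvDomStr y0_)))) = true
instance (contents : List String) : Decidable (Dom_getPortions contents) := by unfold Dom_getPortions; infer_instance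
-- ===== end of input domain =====

-- B replaces A's per-line accumulator state machine by a clean pass (strip lines, drop
-- blanks) followed by find-and-slice: repeatedly locate the next "*" marker and slice out
-- the group before it; objective: alternative decomposition. A's `print` side effect is
-- not modelled; the equivalence is about the return value.

-- ===== PORT A =====
-- A's for-loop over `contents` with the two accumulators `allPortions` and `portion`.
def getPortionsLoop : List String → List (List String) → List String → List (List String)
  | [], allPortions, _ => allPortions
  | line :: rest, allPortions, portion =>
    let line' := PySem.Str.strip line
    if PySem.Str.strip line' = "*" then
      getPortionsLoop rest (allPortions ++ [portion]) []
    else if PySem.Str.len line' = 0 then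
      getPortionsLoop rest allPortions portion
    else
      getPortionsLoop rest allPortions (portion ++ [line'])

def getPortions (contents : List String) : List (List String) :=
  getPortionsLoop contents [] []

-- ===== PORT B =====
-- Source B's while-loop: `tokens.index("*", pos)` is `index? (tokens.drop pos)` shifted by
-- `pos` (exact: Python's ValueError is the `none` branch); `tokens[pos:nxt]` is
-- `(tokens.drop pos).take i` with `nxt = pos + i`.
def pvFindLoop (tokens : List String) (acc : List (List String)) (pos : Nat) : List (List String) :=
  match h : PySem.List.index? (tokens.drop pos) "*" with
  | none => acc
  | some i => pvFindLoop tokens (acc ++ [(tokens.drop pos).take i]) (pos + i + 1)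
termination_by tokens.length - pos
decreasing_by
  obtain ⟨hk, -, -⟩ := PySem.List.getElem_of_index?_eq_some h
  simp only [List.length_drop] at hk
  omega

def getPortions_alt (contents : List String) : List (List String) :=
  pvFindLoop ((contents.map PySem.Str.strip).filter (fun s => s ≠ "")) [] 0

-- ===== PRECONDITION & SPEC =====
def Spec_getPortions (contents : List String) (out : List (List String)) : Prop := out = getPortions_alt contents
instance (contents : List String) (out : List (List String)) : Decidable (Spec_getPortions contents out) := by unfold Spec_getPortions; infer_instance

-- ===== CLAIM (what is proved, stated in full; the proofs are below) =====
def Claim_equal_getPortions : Prop := ∀ (contents : List String), Dom_getPortions contents → Spec_getPortions contents (getPortions contents)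

-- ===== LEMMAS AND PROOFS =====

-- Proof-only middle ground: structural split of a token list on "*", tail discارded.
def pvSplit : List String → List (List String)
  | [] => []
  | head :: rest =>
    if head = "*" then [] :: pvSplit rest
    else
      match pvSplit rest with
      | [] => []
      | g :: gs => (head :: g) :: gs

-- `pvConsHead cur gs` prepends `cur` onto the first group of `gs` (nothing if `gs = []`).
def pvConsHead (cur : List String) : List (List String) → List (List String)
  | [] => []
  | g :: gs => (cur ++ g) :: gs

theorem pvDropWhile_idem {α} (p : α → Bool) (l : List α) :
    List.dropWhile p (List.dropWhile p l) = List.dropWhile p l := by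
  cases h : List.dropWhile p l with
  | nil => simp
  | cons x xs =>
    have hx : p x = false := by
      have := List.head?_dropWhile_not p l
      rw [h] at this; simpa using this
    simp [hx]

theorem pvCharsStrip_idem (cs : List Char) :
    PySem.Chars.strip (PySem.Chars.strip cs) = PySem.Chars.strip cs := by
  unfold PySem.Chars.strip PySem.Chars.rstrip PySem.Chars.lstrip
  set p := PySem.Chars.isspace
  set a := List.dropWhile p cs with ha
  set b := (List.dropWhile p a.reverse).reverse with hb
  have hba : b <+: a := by
    rw [hb]
    have : List.dropWhile p a.reverse <:+ a.reverse := List.dropWhile_suffix _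
    simpa using this.reverse
  have h1 : List.dropWhile p b = b := by
    cases hbc : b with
    | nil => simp
    | cons x xs =>
      obtain ⟨t, hat⟩ := hba
      have hx : p x = false := by
        have := List.head?_dropWhile_not p cs
        rw [← ha, ← hat, hbc] at this
        simpa using this
      simp [hx]
  rw [h1, hb, List.reverse_reverse, pvDropWhile_idem]

theorem pvStrip_idem (s : String) :
    PySem.Str.strip (PySem.Str.strip s) = PySem.Str.strip s := by
  have h : (PySem.Str.strip (PySem.Str.strip s)).toList = (PySem.Str.strip s).toList := by
    simp [PySem.Str.toList_strip, pvCharsStrip_idem]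
  exact String.toList_inj.mp h

theorem pvLen_zero_iff (s : String) : PySem.Str.len s = 0 ↔ s = "" := by
  rw [PySem.Str.len_eq]
  constructor
  · intro h
    have h0 : s.toList = [] := List.eq_nil_of_length_eq_zero (by omega)
    exact String.toList_inj.mp (by simp [h0])
  · intro h; simp [h]

theorem pvConsHead_nil (gs : List (List String)) : pvConsHead [] gs = gs := by
  cases gs <;> simp [pvConsHead]

-- A's loop computes `pvSplit` of the cleaned token list, with `portion` glued onto the first group.
theorem pvLoop_eq (ls : List String) : ∀ (allP : List (List String)) (portion : List String),
    getPortionsLoop ls allP portion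
      = allP ++ pvConsHead portion (pvSplit ((ls.map PySem.Str.strip).filter (fun s => s ≠ ""))) := by
  induction ls with
  | nil => intro allP portion; simp [getPortionsLoop, pvSplit, pvConsHead]
  | cons l ls ih =>
    intro allP portion
    by_cases hstar : PySem.Str.strip l = "*"
    · simp only [getPortionsLoop]
      rw [pvStrip_idem, hstar, if_pos rfl, ih, pvConsHead_nil]
      have hfil : ((l :: ls).map PySem.Str.strip).filter (fun s => s ≠ "")
          = "*" :: (ls.map PySem.Str.strip).filter (fun s => s ≠ "") := by
        simp [hstar]
      rw [hfil]
      simp [pvSplit, pvConsHead]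
    · by_cases hemp : PySem.Str.strip l = ""
      · have hlen : PySem.Str.len (PySem.Str.strip l) = 0 := (pvLen_zero_iff _).mpr hemp
        simp only [getPortionsLoop, pvStrip_idem]
        rw [if_neg hstar, if_pos hlen, ih]
        simp [hemp]
      · have hlen : ¬ PySem.Str.len (PySem.Str.strip l) = 0 := fun h => hemp ((pvLen_zero_iff _).mp h)
        simp only [getPortionsLoop, pvStrip_idem]
        rw [if_neg hstar, if_neg hlen, ih]
        have hfil : ((l :: ls).map PySem.Str.strip).filter (fun s => s ≠ "")
            = PySem.Str.strip l :: (ls.map PySem.Str.strip).filter (fun s => s ≠ "") := by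
          simp [hemp]
        rw [hfil]
        simp only [pvSplit, if_neg hstar]
        cases pvSplit ((ls.map PySem.Str.strip).filter (fun s => s ≠ "")) with
        | nil => simp [pvConsHead]
        | cons g gs => simp [pvConsHead]

theorem pvSplit_no_star (ts : List String) (h : "*" ∉ ts) : pvSplit ts = [] := by
  induction ts with
  | nil => simp [pvSplit]
  | cons t ts ih =>
    have ht : t ≠ "*" := fun e => h (by simp [e])
    simp only [pvSplit, if_neg ht, ih (fun m => h (List.mem_cons_of_mem _ m))]

theorem pvSplit_append (pre suf : List String) (h : "*" ∉ pre) :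
    pvSplit (pre ++ "*" :: suf) = pre :: pvSplit suf := by
  induction pre with
  | nil => simp [pvSplit]
  | cons t pre ih =>
    have ht : t ≠ "*" := fun e => h (by simp [e])
    have := ih (fun m => h (List.mem_cons_of_mem _ m))
    simp only [List.cons_append, pvSplit, if_neg ht, this]

-- B's find-and-slice loop computes `pvSplit` of the remaining suffix.
theorem pvFindLoop_eq (tokens : List String) : ∀ (pos : Nat) (acc : List (List String)),
    pvFindLoop tokens acc pos = acc ++ pvSplit (tokens.drop pos) := by
  have H : ∀ (n pos : Nat), tokens.length - pos ≤ n → ∀ acc,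
      pvFindLoop tokens acc pos = acc ++ pvSplit (tokens.drop pos) := by
    intro n
    induction n with
    | zero =>
      intro pos hpos acc
      have hd : tokens.drop pos = [] := List.drop_eq_nil_of_le (by omega)
      rw [pvFindLoop]
      split
      next h => simp [hd, pvSplit]
      next i h => rw [hd] at h; simp [PySem.List.index?_eq_idxOf?] at h
    | succ n ih =>
      intro pos hpos acc
      rw [pvFindLoop]
      split
      next h =>
        have hnm : "*" ∉ tokens.drop pos := by
          rw [PySem.List.index?_eq_idxOf?] at h
          simpa [List.idxOf?_eq_none_iff] using h
        rw [pvSplit_no_star _ hnm]; simp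
      next i h =>
        obtain ⟨pre, suf, hsplit, hlen, hnotin⟩ := (PySem.List.index?_eq_some_iff _ _ _).mp h
        have hk : i < (tokens.drop pos).length := by
          rw [hsplit]; simp; omega
        have hlt : tokens.length - (pos + i + 1) ≤ n := by
          simp only [List.length_drop] at hk; omega
        rw [ih (pos + i + 1) hlt]
        have htake : (tokens.drop pos).take i = pre := by
          rw [hsplit, ← hlen]; simp
        have hdrop : tokens.drop (pos + i + 1) = suf := by
          have h2 : tokens.drop (pos + i + 1) = (tokens.drop pos).drop (i + 1) := by
            rw [List.drop_drop]; ring_nf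
          rw [h2, hsplit, ← hlen]
          simp
        rw [htake, hdrop, hsplit, pvSplit_append _ _ hnotin]
        simp
  intro pos acc
  exact H (tokens.length - pos) pos le_rfl acc

-- ===== VERDICT (by name: the statement is the Claim_ definition above) =====
theorem getPortions_spec : Claim_equal_getPortions := by
  intro contents _
  unfold Spec_getPortions getPortions getPortions_alt
  rw [pvLoop_eq, pvFindLoop_eq]
  simp [pvConsHead_nil]
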